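-- pv_equiv track=rewrite | github.com/kintrix007/thing-for-dnd-i-guess-idk | main.py | get_table_value
-- ===== SOURCE A (Python) =====
-- def get_table_value(table: list[int]) -> int:
--     def sum_indeces(*indeces: list[int]) -> int:
--         return sum(table[i] for i in indeces)
--
--     sums = [
--         sum_indeces(0,1,2),
--         sum_indeces(3,4,5),
--         sum_indeces(6,7,8),
--         sum_indeces(0,3,6),
--         sum_indeces(1,4,7),
--         sum_indeces(2,5,8),
--         sum_indeces(0,4,8),
--         sum_indeces(2,4,6),
--     ]
--
--     return sum(sorted(sums)[2:])
-- ===== SOURCE B (Python) =====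
-- def get_table_value(table: list[int]) -> int:
--     r1 = table[0] + table[1] + table[2]
--     r2 = table[3] + table[4] + table[5]
--     r3 = table[6] + table[7] + table[8]
--     c1 = table[0] + table[3] + table[6]
--     c2 = table[1] + table[4] + table[7]
--     c3 = table[2] + table[5] + table[8]
--     d1 = table[0] + table[4] + table[8]
--     d2 = table[2] + table[4] + table[6]
--     total = r1 + r2 + r3 + c1 + c2 + c3 + d1 + d2
--     # drop the two smallest line sums: track two running minima, no sort
--     m1, m2 = (r1, r2) if r1 <= r2 else (r2, r1)
--     for s in (r3, c1, c2, c3, d1, d2):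
--         if s < m1:
--             m1, m2 = s, m1
--         elif s < m2:
--             m2 = s
--     return total - m1 - m2
-- ===== Notes on version B (the rewrite author's own statement) =====
-- stated objective: alternative
-- what changed: B replaces A's sort-then-drop-prefix-then-sum with total-of-all-eight-line-sums minus two running minima maintained in a single scan (no sort, no slice, no re-summation of six elements).
import Mathlib
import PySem

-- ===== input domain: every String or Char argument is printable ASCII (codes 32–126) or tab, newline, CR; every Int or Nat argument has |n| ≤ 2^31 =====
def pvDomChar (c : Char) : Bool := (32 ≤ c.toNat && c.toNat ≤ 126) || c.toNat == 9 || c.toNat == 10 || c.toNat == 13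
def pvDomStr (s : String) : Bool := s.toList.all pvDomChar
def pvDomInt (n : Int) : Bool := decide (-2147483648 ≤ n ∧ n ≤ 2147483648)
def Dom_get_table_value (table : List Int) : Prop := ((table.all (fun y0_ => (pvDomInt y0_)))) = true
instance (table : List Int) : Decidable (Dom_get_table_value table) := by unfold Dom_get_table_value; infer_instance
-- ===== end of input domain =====

-- B replaces A's sort-and-drop-two-smallest with total minus two running minima kept in one scan (no sort); same value everywhere A returns (Pre_: len ≥ 9).


-- ===== PORT A =====
-- a table lookup is PySem.List.pyGetD table i 0: the default is unreachable under Pre_ (indices 0..8 < len);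
-- sorted(sums)[2:] with the nonnegative literal 2 is .drop 2.
def get_table_value (table : List Int) : Int :=
  let sum_indeces : List Int → Int := fun indeces =>
    (indeces.map (fun i => PySem.List.pyGetD table i 0)).sum
  let sums : List Int :=
    [sum_indeces [0, 1, 2], sum_indeces [3, 4, 5], sum_indeces [6, 7, 8],
     sum_indeces [0, 3, 6], sum_indeces [1, 4, 7], sum_indeces [2, 5, 8],
     sum_indeces [0, 4, 8], sum_indeces [2, 4, 6]]
  ((PySem.List.sorted sums (fun x => x) false).drop 2).sum

-- ===== PORT B =====
-- one step of B's loop body: update the two running minima (m1, m2) with s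
def pvStep (mm : Int × Int) (s : Int) : Int × Int :=
  if s < mm.1 then (s, mm.1) else if s < mm.2 then (mm.1, s) else mm

def get_table_value_alt (table : List Int) : Int :=
  let g := fun (i : Int) => PySem.List.pyGetD table i 0
  let r1 := g 0 + g 1 + g 2
  let r2 := g 3 + g 4 + g 5
  let r3 := g 6 + g 7 + g 8
  let c1 := g 0 + g 3 + g 6
  let c2 := g 1 + g 4 + g 7
  let c3 := g 2 + g 5 + g 8
  let d1 := g 0 + g 4 + g 8
  let d2 := g 2 + g 4 + g 6
  let total := r1 + r2 + r3 + c1 + c2 + c3 + d1 + d2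
  let mm := [r3, c1, c2, c3, d1, d2].foldl pvStep (if r1 ≤ r2 then (r1, r2) else (r2, r1))
  total - mm.1 - mm.2

-- ===== PRECONDITION & SPEC =====
-- Pre_: A indexes the first nine elements, raising IndexError when the list has fewer than 9 elements.
def Pre_get_table_value (table : List Int) : Prop := 9 ≤ table.length
instance (table : List Int) : Decidable (Pre_get_table_value table) := by
  unfold Pre_get_table_value; infer_instance
def pvWitness_get_table_value : List Int := [1, 2, 3, 4, 5, 6, 7, 8, 9]
def Spec_get_table_value (table : List Int) (out : Int) : Prop := out = get_table_value_alt table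
instance (table : List Int) (out : Int) : Decidable (Spec_get_table_value table out) := by
  unfold Spec_get_table_value; infer_instance

-- ===== CLAIM (what is proved, stated in full; the proofs are below) =====
def Claim_equal_get_table_value : Prop := ∀ (table : List Int), Dom_get_table_value table → Pre_get_table_value table → Spec_get_table_value table (get_table_value table)

-- ===== LEMMAS AND PROOFS =====

-- B's two-minima scan names the first two entries of the (insertion-)sorted list.
theorem scan_sorted (a b : Int) (hab : a ≤ b) (l : List Int) :
    ∃ rest, PySem.List.sorted (a :: b :: l) (fun x => x) false =
      (l.foldl pvStep (a, b)).1 :: (l.foldl pvStep (a, b)).2 :: rest := by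
  induction l using List.reverseRecOn with
  | nil =>
    refine ⟨[], ?_⟩
    rw [PySem.List.sorted_eq_self_of_pairwise]
    · rfl
    · simp [List.pairwise_cons, hab]
  | append_singleton l s ih =>
    obtain ⟨rest, hs⟩ := ih
    have h1 : a :: b :: (l ++ [s]) = (a :: b :: l) ++ [s] := by simp
    rw [h1, PySem.List.sorted_eq_foldl_insertBy, List.foldl_append,
        ← PySem.List.sorted_eq_foldl_insertBy, hs, List.foldl_append]
    simp only [List.foldl_cons, List.foldl_nil]
    set mm := l.foldl pvStep (a, b) with hmm
    by_cases h2 : s < mm.1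
    · refine ⟨mm.2 :: rest, ?_⟩
      simp [PySem.List.insertBy, h2, pvStep]
    · by_cases h3 : s < mm.2
      · refine ⟨mm.2 :: rest, ?_⟩
        simp [PySem.List.insertBy, h2, h3, pvStep]
      · refine ⟨PySem.List.insertBy (fun x y => decide (x < y)) s rest, ?_⟩
        simp [PySem.List.insertBy, h2, h3, pvStep]

-- the assembled fact about eight values: drop-two-smallest sum = total − the two scanned minima
theorem eight_core (r1 r2 r3 c1 c2 c3 d1 d2 : Int) :
    ((PySem.List.sorted [r1, r2, r3, c1, c2, c3, d1, d2] (fun x => x) false).drop 2).sum =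
      (r1 + r2 + r3 + c1 + c2 + c3 + d1 + d2) -
        ([r3, c1, c2, c3, d1, d2].foldl pvStep (if r1 ≤ r2 then (r1, r2) else (r2, r1))).1 -
        ([r3, c1, c2, c3, d1, d2].foldl pvStep (if r1 ≤ r2 then (r1, r2) else (r2, r1))).2 := by
  by_cases h : r1 ≤ r2
  · obtain ⟨rest, hs⟩ := scan_sorted r1 r2 h [r3, c1, c2, c3, d1, d2]
    have hperm := PySem.List.sorted_perm [r1, r2, r3, c1, c2, c3, d1, d2] (fun x => x) false
    rw [show (r1 :: r2 :: [r3, c1, c2, c3, d1, d2] : List Int) =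
        [r1, r2, r3, c1, c2, c3, d1, d2] from rfl] at hs
    rw [hs] at hperm ⊢
    have hsum := hperm.sum_eq
    simp only [List.sum_cons, List.sum_nil, add_zero] at hsum
    rw [if_pos h]
    simp only [List.drop_succ_cons, List.drop_zero]
    omega
  · have hswap : PySem.List.sorted [r1, r2, r3, c1, c2, c3, d1, d2] (fun x => x) false =
        PySem.List.sorted [r2, r1, r3, c1, c2, c3, d1, d2] (fun x => x) false := by
      exact PySem.List.sorted_eq_sorted_of_perm _ _ _ (fun x y hxy => hxy) (List.Perm.swap _ _ _)
    obtain ⟨rest, hs⟩ := scan_sorted r2 r1 (by omega) [r3, c1, c2, c3, d1, d2]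
    have hperm := PySem.List.sorted_perm [r2, r1, r3, c1, c2, c3, d1, d2] (fun x => x) false
    rw [show (r2 :: r1 :: [r3, c1, c2, c3, d1, d2] : List Int) =
        [r2, r1, r3, c1, c2, c3, d1, d2] from rfl] at hs
    rw [hs] at hperm
    rw [hswap, hs]
    have hsum := hperm.sum_eq
    simp only [List.sum_cons, List.sum_nil, add_zero] at hsum
    rw [if_neg h]
    simp only [List.drop_succ_cons, List.drop_zero]
    omega

-- ===== VERDICT (by name: the statement is the Claim_ definition above) =====
theorem get_table_value_spec : Claim_equal_get_table_value := by
  intro table _ hpre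
  unfold Pre_get_table_value at hpre
  obtain ⟨t0, t1, t2, t3, t4, t5, t6, t7, t8, rest, rfl⟩ :
      ∃ t0 t1 t2 t3 t4 t5 t6 t7 t8 rest,
        table = t0 :: t1 :: t2 :: t3 :: t4 :: t5 :: t6 :: t7 :: t8 :: rest := by
    match table, hpre with
    | t0 :: t1 :: t2 :: t3 :: t4 :: t5 :: t6 :: t7 :: t8 :: rest, _ =>
      exact ⟨t0, t1, t2, t3, t4, t5, t6, t7, t8, rest, rfl⟩
  unfold Spec_get_table_value get_table_value get_table_value_alt
  simp only [List.map, List.sum_cons, List.sum_nil, add_zero]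
  simp only [pysem]
  have hd0 : List.getD (t0 :: t1 :: t2 :: t3 :: t4 :: t5 :: t6 :: t7 :: t8 :: rest) 0 0 = t0 := rfl
  have hd1 : List.getD (t0 :: t1 :: t2 :: t3 :: t4 :: t5 :: t6 :: t7 :: t8 :: rest) 1 0 = t1 := rfl
  have hd2 : List.getD (t0 :: t1 :: t2 :: t3 :: t4 :: t5 :: t6 :: t7 :: t8 :: rest) 2 0 = t2 := rfl
  have hd3 : List.getD (t0 :: t1 :: t2 :: t3 :: t4 :: t5 :: t6 :: t7 :: t8 :: rest) 3 0 = t3 := rfl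
  have hd4 : List.getD (t0 :: t1 :: t2 :: t3 :: t4 :: t5 :: t6 :: t7 :: t8 :: rest) 4 0 = t4 := rfl
  have hd5 : List.getD (t0 :: t1 :: t2 :: t3 :: t4 :: t5 :: t6 :: t7 :: t8 :: rest) 5 0 = t5 := rfl
  have hd6 : List.getD (t0 :: t1 :: t2 :: t3 :: t4 :: t5 :: t6 :: t7 :: t8 :: rest) 6 0 = t6 := rfl
  have hd7 : List.getD (t0 :: t1 :: t2 :: t3 :: t4 :: t5 :: t6 :: t7 :: t8 :: rest) 7 0 = t7 := rfl
  have hd8 : List.getD (t0 :: t1 :: t2 :: t3 :: t4 :: t5 :: t6 :: t7 :: t8 :: rest) 8 0 = t8 := rfl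
  rw [hd0, hd1, hd2, hd3, hd4, hd5, hd6, hd7, hd8]
  have e1 : t0 + (t1 + t2) = t0 + t1 + t2 := by ring
  have e2 : t3 + (t4 + t5) = t3 + t4 + t5 := by ring
  have e3 : t6 + (t7 + t8) = t6 + t7 + t8 := by ring
  have e4 : t0 + (t3 + t6) = t0 + t3 + t6 := by ring
  have e5 : t1 + (t4 + t7) = t1 + t4 + t7 := by ring
  have e6 : t2 + (t5 + t8) = t2 + t5 + t8 := by ring
  have e7 : t0 + (t4 + t8) = t0 + t4 + t8 := by ring
  have e8 : t2 + (t4 + t6) = t2 + t4 + t6 := by ring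
  rw [e1, e2, e3, e4, e5, e6, e7, e8]
  exact eight_core (t0 + t1 + t2) (t3 + t4 + t5) (t6 + t7 + t8) (t0 + t3 + t6)
    (t1 + t4 + t7) (t2 + t5 + t8) (t0 + t4 + t8) (t2 + t4 + t6)
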